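-- pv_equiv track=rewrite | github.com/omar344/multi-model-rag-app | src/controllers/nlpController.py | is_image_query
-- ===== SOURCE A (Python) =====
-- def is_image_query(query: str) -> bool:
--     image_keywords = [
--         "image", "figure", "diagram", "chart", "picture", "photo", "see", "show",
--         "illustration", "graph", "table", "visual", "plot", "map", "screenshot",
--         "scan", "drawing", "sketch", "look like"
--     ]
--     query_lower = query.lower()
--     return any(kw in query_lower for kw in image_keywords)
-- ===== SOURCE B (Python) =====
-- IMAGE_KEYWORDS = [
--     "image", "figure", "diagram", "chart", "picture", "photo", "see", "show",
--     "illustration", "graph", "table", "visual", "plot", "map", "screenshot",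
--     "scan", "drawing", "sketch", "look like"
-- ]
--
--
-- def is_image_query(query: str) -> bool:
--     # Single left-to-right scan of the lowered query: at each position test
--     # whether one of the keywords starts there, instead of one full substring
--     # search per keyword.
--     q = query.lower()
--     for i in range(len(q)):
--         if any(q.startswith(kw, i) for kw in IMAGE_KEYWORDS):
--             return True
--     return False
-- ===== Notes on version B (the rewrite author's own statement) =====
-- stated objective: alternative
-- what changed: Replaces the per-keyword full-substring scans ('kw in query_lower' for each of the 19 keywords) by a single left-to-right scan of the lowered query that tests at each position whether any keyword starts there.
import Mathlib
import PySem

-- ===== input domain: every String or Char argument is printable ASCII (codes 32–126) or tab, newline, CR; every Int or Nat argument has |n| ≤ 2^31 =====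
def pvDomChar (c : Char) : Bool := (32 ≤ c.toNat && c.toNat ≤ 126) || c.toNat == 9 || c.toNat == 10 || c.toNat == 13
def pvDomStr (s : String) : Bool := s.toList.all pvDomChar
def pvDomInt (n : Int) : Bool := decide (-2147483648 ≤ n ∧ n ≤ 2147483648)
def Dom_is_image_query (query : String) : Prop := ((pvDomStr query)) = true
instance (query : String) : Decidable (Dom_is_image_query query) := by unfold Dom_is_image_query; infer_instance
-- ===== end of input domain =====

-- B changes the traversal: one left-to-right scan of the lowered query testing keyword prefixes
-- at each position, instead of one full substring search per keyword (alternative, same cost class).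

-- ===== PORT A =====
def aImageKeywords : List String :=
  ["image", "figure", "diagram", "chart", "picture", "photo", "see", "show",
   "illustration", "graph", "table", "visual", "plot", "map", "screenshot",
   "scan", "drawing", "sketch", "look like"]

def is_image_query (query : String) : Bool :=
  let query_lower := PySem.Str.lower query
  aImageKeywords.any (fun kw => PySem.Str.isIn kw query_lower)

-- ===== PORT B =====
def bImageKeywords : List (List Char) :=
  ["image".toList, "figure".toList, "diagram".toList, "chart".toList, "picture".toList,
   "photo".toList, "see".toList, "show".toList, "illustration".toList, "graph".toList,
   "table".toList, "visual".toList, "plot".toList, "map".toList, "screenshot".toList,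
   "scan".toList, "drawing".toList, "sketch".toList, "look like".toList]

-- 'for i in range(len(q)): if any(q.startswith(kw, i) …)' as structural recursion on suffixes
def bScan : List Char → Bool
  | [] => false
  | c :: rest =>
      bImageKeywords.any (fun kw => PySem.Chars.startswith (c :: rest) kw) || bScan rest

def is_image_query_alt (query : String) : Bool :=
  bScan (PySem.Chars.lower query.toList)

-- ===== PRECONDITION & SPEC =====
def Spec_is_image_query (query : String) (out : Bool) : Prop := out = is_image_query_alt query
instance (query : String) (out : Bool) : Decidable (Spec_is_image_query query out) := by unfold Spec_is_image_query; infer_instance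

-- ===== CLAIM (what is proved, stated in full; the proofs are below) =====
def Claim_equal_is_image_query : Prop := ∀ (query : String), Dom_is_image_query query → Spec_is_image_query query (is_image_query query)

-- ===== LEMMAS AND PROOFS =====

lemma bScan_iff (L : List Char) :
    bScan L = true ↔ ∃ kw ∈ bImageKeywords, kw <:+: L := by
  induction L with
  | nil =>
      simp only [bScan]
      constructor
      · intro h; exact absurd h (by decide)
      · rintro ⟨kw, hkw, hinf⟩
        have hne : kw ≠ [] := by
          fin_cases hkw <;> decide
        exact absurd (List.eq_nil_of_infix_nil hinf) hne
  | cons c rest ih =>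
      simp only [bScan, Bool.or_eq_true, List.any_eq_true, ih]
      constructor
      · rintro (⟨kw, hkw, hpre⟩ | ⟨kw, hkw, hinf⟩)
        · exact ⟨kw, hkw, ((PySem.Chars.startswith_iff _ _).mp hpre).isInfix⟩
        · exact ⟨kw, hkw, hinf.trans (List.infix_cons_iff.mpr (Or.inr (List.infix_refl rest)) : rest <:+: c :: rest)⟩
      · rintro ⟨kw, hkw, hinf⟩
        rcases List.infix_cons_iff.mp hinf with hpre | hinf'
        · exact Or.inl ⟨kw, hkw, (PySem.Chars.startswith_iff _ _).mpr hpre⟩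
        · exact Or.inr ⟨kw, hkw, hinf'⟩

lemma keywords_map : aImageKeywords.map String.toList = bImageKeywords := by decide

-- ===== VERDICT (by name: the statement is the Claim_ definition above) =====
theorem is_image_query_spec : Claim_equal_is_image_query := by
  intro query _
  unfold Spec_is_image_query is_image_query is_image_query_alt
  rw [Bool.eq_iff_iff, bScan_iff]
  simp only [List.any_eq_true]
  constructor
  · rintro ⟨kw, hkw, hin⟩
    refine ⟨kw.toList, ?_, ?_⟩
    · rw [← keywords_map]; exact List.mem_map_of_mem hkw
    · have := (PySem.Str.isIn_iff_infix kw (PySem.Str.lower query)).mp hin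
      simpa [PySem.Str.toList_lower] using this
  · rintro ⟨kwl, hkwl, hinf⟩
    rw [← keywords_map] at hkwl
    rcases List.mem_map.mp hkwl with ⟨kw, hkw, rfl⟩
    refine ⟨kw, hkw, (PySem.Str.isIn_iff_infix kw (PySem.Str.lower query)).mpr ?_⟩
    simpa [PySem.Str.toList_lower] using hinf
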